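-- pv_equiv track=rewrite | github.com/Lucas-Fiche/IDP_graduacao | terceiro_semestre/tecnicas/LEA04_py/ex003/vencedor.py | promocao_cinema
-- ===== SOURCE A (Python) =====
-- import bisect
--
-- def promocao_cinema(P, R, lista_cadeiras):
--     cadeiras_ordenadas = []
--     lista_resultados = []
--
--     for cadeira_atual in lista_cadeiras:
--         bisect.insort(cadeiras_ordenadas, cadeira_atual)
--
--         if R <= len(cadeiras_ordenadas):
--             cadeira_vencedora = cadeiras_ordenadas[R - 1]
--         else:
--             cadeira_vencedora = cadeiras_ordenadas[-1]
--
--         lista_resultados.append(cadeira_vencedora)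
--
--     return lista_resultados
-- ===== SOURCE B (Python) =====
-- def promocao_cinema(P, R, lista_cadeiras):
--     # Unsorted bounded buffer of the R smallest seats seen so far: append while
--     # short, otherwise evict the current maximum when the new seat beats it;
--     # the reported seat at each step is the buffer's maximum (no sorting at all).
--     menores = []
--     lista_resultados = []
--     for cadeira_atual in lista_cadeiras:
--         if len(menores) < R:
--             menores.append(cadeira_atual)
--         else:
--             maior = max(menores)
--             if cadeira_atual < maior:
--                 menores.remove(maior)
--                 menores.append(cadeira_atual)
--         lista_resultados.append(max(menores))
--     return lista_resultados
-- ===== Notes on version B (the rewrite author's own statement) =====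
-- stated objective: alternative
-- what changed: Instead of keeping the whole prefix sorted with bisect.insort and indexing position R-1, B keeps an UNSORTED bounded buffer of the R smallest seats seen so far (append while short, otherwise evict the current maximum when the new seat beats it) and reports the buffer's maximum; it never sorts and its per-step cost is O(min(R,n)) instead of A's O(n).
-- outside the precondition, e.g. on promocao_cinema(1, 0, [3, 1, 2]): A returns [3, 3, 3], B raises ValueError
import Mathlib
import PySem

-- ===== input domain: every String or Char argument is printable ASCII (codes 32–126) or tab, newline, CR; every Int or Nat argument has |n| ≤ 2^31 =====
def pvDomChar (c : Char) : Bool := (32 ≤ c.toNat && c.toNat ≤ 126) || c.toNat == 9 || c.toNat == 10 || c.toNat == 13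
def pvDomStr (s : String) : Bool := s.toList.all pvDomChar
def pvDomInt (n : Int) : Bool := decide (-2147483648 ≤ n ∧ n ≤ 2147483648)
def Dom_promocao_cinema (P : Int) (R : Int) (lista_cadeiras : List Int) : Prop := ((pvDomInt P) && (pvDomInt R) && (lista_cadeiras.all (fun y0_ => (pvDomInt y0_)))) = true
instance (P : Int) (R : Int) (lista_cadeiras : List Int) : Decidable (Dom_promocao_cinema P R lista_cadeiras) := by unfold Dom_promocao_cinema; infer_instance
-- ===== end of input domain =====

-- B replaces A's ever-growing sorted prefix (indexed at position R-1) by an unsorted bounded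
-- buffer of the R smallest seats seen so far, reporting the buffer's maximum each step.


-- ===== PORT A =====
-- bisect.insort: insert before the first strictly greater element
def pvInsort (xs : List Int) (x : Int) : List Int :=
  PySem.List.insertBy (fun a b => decide (a < b)) x xs

def pvStepA (R : Int) (st : List Int × List Int) (c : Int) : List Int × List Int :=
  let s := pvInsort st.1 c
  (s, st.2 ++ [if R ≤ PySem.List.len s then PySem.List.pyGetD s (R - 1) 0
               else PySem.List.pyGetD s (-1) 0])

def promocao_cinema (P : Int) (R : Int) (lista_cadeiras : List Int) : List Int :=
  (lista_cadeiras.foldl (pvStepA R) ([], [])).2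

-- ===== PORT B =====
-- max(menores) raises ValueError only when the buffer is empty, which under Pre_ (R ≥ 1)
-- never happens once an element has been seen; the .getD defaults are unreachable there.
def pvStepB (R : Int) (st : List Int × List Int) (c : Int) : List Int × List Int :=
  let men :=
    if PySem.List.len st.1 < R then st.1 ++ [c]
    else
      let maior := (PySem.List.max? st.1 (fun x => x)).getD 0
      if c < maior then ((PySem.List.remove? st.1 maior).getD []) ++ [c]
      else st.1
  (men, st.2 ++ [(PySem.List.max? men (fun x => x)).getD 0])

def promocao_cinema_alt (P : Int) (R : Int) (lista_cadeiras : List Int) : List Int :=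
  (lista_cadeiras.foldl (pvStepB R) ([], [])).2

-- ===== PRECONDITION & SPEC =====
-- Pre_ requires R ≥ 1: for R ≤ 0 the Python A indexes with R - 1 ≤ -1 via negative-index
-- wraparound — it raises IndexError for R < 0 on any nonempty list and accidentally returns
-- the running maximum for R = 0 — while B's buffer of the R smallest stays empty and
-- max([]) raises ValueError.
def Pre_promocao_cinema (P : Int) (R : Int) (lista_cadeiras : List Int) : Prop := 1 ≤ R
instance (P : Int) (R : Int) (lista_cadeiras : List Int) : Decidable (Pre_promocao_cinema P R lista_cadeiras) := by unfold Pre_promocao_cinema; infer_instance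

def pvWitness_promocao_cinema : Int × Int × List Int := (1, 2, [3, 1, 2])

def Spec_promocao_cinema (P : Int) (R : Int) (lista_cadeiras : List Int) (out : List Int) : Prop := out = promocao_cinema_alt P R lista_cadeiras
instance (P : Int) (R : Int) (lista_cadeiras : List Int) (out : List Int) : Decidable (Spec_promocao_cinema P R lista_cadeiras out) := by unfold Spec_promocao_cinema; infer_instance

-- ===== CLAIM (what is proved, stated in full; the proofs are below) =====
def Claim_equal_promocao_cinema : Prop := ∀ (P : Int) (R : Int) (lista_cadeiras : List Int), Dom_promocao_cinema P R lista_cadeiras → Pre_promocao_cinema P R lista_cadeiras → Spec_promocao_cinema P R lista_cadeiras (promocao_cinema P R lista_cadeiras)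

-- ===== LEMMAS AND PROOFS =====

lemma pvInsort_nil (x : Int) : pvInsort [] x = [x] := rfl

lemma pvInsort_cons (y : Int) (ys : List Int) (x : Int) :
    pvInsort (y :: ys) x = if x < y then x :: y :: ys else y :: pvInsort ys x := by
  simp [pvInsort, PySem.List.insertBy]

lemma pvInsort_length (xs : List Int) (x : Int) : (pvInsort xs x).length = xs.length + 1 := by
  induction xs with
  | nil => rfl
  | cons y ys ih => rw [pvInsort_cons]; by_cases h : x < y <;> simp [h, ih]

lemma pvInsort_perm (xs : List Int) (x : Int) : (pvInsort xs x).Perm (xs ++ [x]) := by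
  induction xs with
  | nil => simp [pvInsort_nil]
  | cons y ys ih =>
      rw [pvInsort_cons]
      by_cases h : x < y
      · rw [if_pos h]
        exact (List.Perm.swap y x ys).trans
          ((List.perm_append_singleton x ys).symm.cons y)
      · rw [if_neg h]
        simpa using ih.cons y

lemma pvInsort_sorted (xs : List Int) (x : Int) (h : xs.Pairwise (· ≤ ·)) :
    (pvInsort xs x).Pairwise (· ≤ ·) := by
  induction xs with
  | nil => simp [pvInsort_nil]
  | cons y ys ih =>
      rcases List.pairwise_cons.mp h with ⟨hy, hys⟩
      rw [pvInsort_cons]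
      by_cases hxy : x < y
      · rw [if_pos hxy]
        refine List.pairwise_cons.mpr ⟨?_, h⟩
        intro z hz
        rcases List.mem_cons.mp hz with rfl | hz
        · omega
        · exact le_trans (le_of_lt hxy) (hy z hz)
      · rw [if_neg hxy]
        refine List.pairwise_cons.mpr ⟨?_, ih hys⟩
        intro z hz
        rcases (PySem.List.mem_insertBy _ _ _ _).mp hz with rfl | hz
        · omega
        · exact hy z hz

-- the first k elements of an insertion only depend on the first k elements of the list
lemma pvInsort_take (xs : List Int) (x : Int) : ∀ k : Nat,
    (pvInsort xs x).take k = (pvInsort (xs.take k) x).take k := by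
  induction xs with
  | nil => intro k; simp
  | cons y ys ih =>
      intro k
      by_cases h : x < y
      · cases k with
        | zero => simp
        | succ m =>
            rw [List.take_succ_cons, pvInsort_cons, if_pos h, pvInsort_cons, if_pos h]
            cases m with
            | zero => simp
            | succ j => simp [List.take_take]
      · cases k with
        | zero => simp
        | succ m => simp [pvInsort_cons, h, ih m]

lemma pvInsort_append_of_le (xs : List Int) (x : Int) (hall : ∀ y ∈ xs, y ≤ x) :
    pvInsort xs x = xs ++ [x] := by
  induction xs with
  | nil => rfl
  | cons y ys ih =>
      rw [pvInsort_cons, if_neg (by have := hall y (by simp); omega)]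
      simp [ih (fun z hz => hall z (by simp [hz]))]

lemma sorted_le_getLast : ∀ (xs : List Int), xs.Pairwise (· ≤ ·) → ∀ (hne : xs ≠ []) (y : Int), y ∈ xs → y ≤ xs.getLast hne := by
  intro xs
  induction xs with
  | nil => intro _ hne; simp at hne
  | cons a t ih =>
      intro h hne y hy
      rcases List.pairwise_cons.mp h with ⟨ha, ht⟩
      cases t with
      | nil => simp at hy; simp [hy]
      | cons b u =>
          rw [List.getLast_cons (by simp)]
          rcases List.mem_cons.mp hy with rfl | hy
          · exact le_trans (ha b (by simp)) (ih ht (by simp) b (by simp))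
          · exact ih ht (by simp) y hy

lemma take_ne_nil (s : List Int) (k : Nat) (h1 : 1 ≤ k) (h2 : s ≠ []) : s.take k ≠ [] := by
  simp [List.take_eq_nil_iff, h2]; omega

lemma getD_take_neg_one (s : List Int) (k : Nat) (h1 : 1 ≤ k) (hk : k ≤ s.length) :
    PySem.List.pyGetD (s.take k) (-1) 0 = s[k - 1]'(by omega) := by
  have hne : s.take k ≠ [] := take_ne_nil s k h1 (by intro h; subst h; simp at hk; omega)
  rw [PySem.List.pyGetD_neg_one _ _ hne, List.getLast_eq_getElem]
  have hlen : (s.take k).length = k := by simp; omega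
  simp only [List.getElem_take, hlen]

-- A's reported seat is the last element of the R smallest of its sorted prefix
lemma winner_eq (R : Int) (hR : 1 ≤ R) (s : List Int) :
    (if R ≤ PySem.List.len s then PySem.List.pyGetD s (R - 1) 0
     else PySem.List.pyGetD s (-1) 0) = PySem.List.pyGetD (s.take R.toNat) (-1) 0 := by
  by_cases h1 : R ≤ PySem.List.len s
  · rw [if_pos h1]
    simp only [PySem.List.len_eq] at h1
    have hk : R.toNat ≤ s.length := by omega
    rw [getD_take_neg_one s R.toNat (by omega) hk]
    have hcast : R - 1 = ((R.toNat - 1 : Nat) : Int) := by omega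
    rw [hcast, PySem.List.pyGetD_natCast]
    rw [List.getD_eq_getElem _ _ (by omega)]
  · rw [if_neg h1]
    simp only [PySem.List.len_eq] at h1
    rw [List.take_of_length_le (by omega)]

-- Python's max over any rearrangement of a nonempty sorted list is that list's last element
lemma max_perm_sorted (l t : List Int) (hp : l.Perm t) (ht : t.Pairwise (· ≤ ·))
    (hne : t ≠ []) : PySem.List.max? l (fun x => x) = some (t.getLast hne) := by
  have hlne : l ≠ [] := by
    intro h; subst h; exact hne (List.Perm.nil_eq hp).symm
  cases hmx : PySem.List.max? l (fun x => x) with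
  | none => exact absurd ((PySem.List.max?_eq_none_iff l _).mp hmx) hlne
  | some m =>
      have hmem : m ∈ t := hp.mem_iff.mp (PySem.List.max?_mem hmx)
      have h1 : m ≤ t.getLast hne := sorted_le_getLast t ht hne m hmem
      have h2 : t.getLast hne ≤ m :=
        PySem.List.max?_isMax hmx _ (hp.mem_iff.mpr (List.getLast_mem hne))
      congr 1; omega

-- invariant: B's buffer is a rearrangement of the R smallest of A's sorted list,
-- and the two reported seats coincide at every step
lemma loop_eq (R : Int) (hR : 1 ≤ R) : ∀ (l s men res : List Int), s.Pairwise (· ≤ ·) →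
    men.Perm (s.take R.toNat) →
    (l.foldl (pvStepA R) (s, res)).2 = (l.foldl (pvStepB R) (men, res)).2 := by
  intro l
  induction l with
  | nil => intro s men res _ _; simp
  | cons c t ih =>
      intro s men res hs hperm
      set r := R.toNat with hr
      have hr1 : 1 ≤ r := by omega
      have hs' : (pvInsort s c).Pairwise (· ≤ ·) := pvInsort_sorted s c hs
      have hmenlen : men.length = min r s.length := by
        rw [hperm.length_eq, List.length_take]
      -- B's new buffer is a rearrangement of the R smallest of A's new sorted list
      have hkey : (pvStepB R (men, res) c).1.Perm ((pvInsort s c).take r) := by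
        by_cases hlt : men.length < r
        · have hsl : s.length < r := by omega
          have h1 : s.take r = s := List.take_of_length_le (by omega)
          have h2 : (pvInsort s c).take r = pvInsort s c :=
            List.take_of_length_le (by rw [pvInsort_length]; omega)
          simp only [pvStepB, PySem.List.len_eq]
          rw [if_pos (by omega), h2]
          refine (hperm.append_right [c]).trans ?_
          rw [h1]
          exact (pvInsort_perm s c).symm
        · have hrl : r ≤ s.length := by omega
          have hsne : s ≠ [] := by intro h; subst h; simp at hrl; omega
          have hLne : s.take r ≠ [] := take_ne_nil s r hr1 hsne
          have hLsorted : (s.take r).Pairwise (· ≤ ·) := hs.take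
          set m := (s.take r).getLast hLne with hm
          have hmax : PySem.List.max? men (fun x => x) = some m :=
            max_perm_sorted men (s.take r) hperm hLsorted hLne
          have hmmem : m ∈ men := hperm.mem_iff.mpr (List.getLast_mem hLne)
          have hmaxtake : ∀ y ∈ s.take r, y ≤ m :=
            fun y hy => sorted_le_getLast (s.take r) hLsorted hLne y hy
          simp only [pvStepB, PySem.List.len_eq]
          rw [if_neg (by omega), hmax]
          simp only [Option.getD_some]
          by_cases hc : c < m
          · rw [if_pos hc]
            set X := pvInsort (s.take r) c with hX
            have hXlen : X.length = r + 1 := by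
              rw [hX, pvInsort_length, List.length_take]; omega
            have hXne : X ≠ [] := by intro h; rw [h] at hXlen; simp at hXlen
            have hXsorted : X.Pairwise (· ≤ ·) := pvInsort_sorted _ _ hLsorted
            have hdrop : (pvInsort s c).take r = X.dropLast := by
              rw [List.dropLast_eq_take, hXlen, Nat.add_sub_cancel, hX,
                ← pvInsort_take]
            have hXperm : X.Perm (s.take r ++ [c]) := pvInsort_perm _ _
            have hXlast : X.getLast hXne = m := by
              have hub : X.getLast hXne ≤ m := by
                have hmem := List.getLast_mem hXne
                rcases (PySem.List.mem_insertBy _ _ _ _).mp hmem with h | h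
                · omega
                · exact hmaxtake _ h
              have hlb : m ≤ X.getLast hXne :=
                sorted_le_getLast X hXsorted hXne m
                  ((PySem.List.mem_insertBy _ _ _ _).mpr
                    (Or.inr (List.getLast_mem hLne)))
              omega
            have hsplit : X.Perm (m :: X.dropLast) := by
              conv_lhs => rw [← List.dropLast_append_getLast hXne]
              rw [hXlast]
              exact List.perm_append_singleton m X.dropLast
            have hcons : (m :: X.dropLast).Perm (m :: ((s.take r).erase m ++ [c])) := by
              exact (hsplit.symm.trans hXperm).trans
                ((List.perm_cons_erase (List.getLast_mem hLne)).append_right [c])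
            have hdropP : X.dropLast.Perm ((s.take r).erase m ++ [c]) :=
              hcons.cons_inv
            rw [PySem.List.remove?_eq_some_erase men m hmmem]
            simp only [Option.getD_some]
            rw [hdrop]
            exact ((hperm.erase m).append_right [c]).trans hdropP.symm
          · rw [if_neg hc]
            have hall : ∀ y ∈ s.take r, y ≤ c := fun y hy => by
              have := hmaxtake y hy; omega
            have heq : (pvInsort s c).take r = s.take r := by
              rw [pvInsort_take s c r, pvInsort_append_of_le _ _ hall,
                List.take_append_of_le_length (by rw [List.length_take]; omega),
                List.take_take]
              simp
            rw [heq]; exact hperm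
      -- both steps append the same reported seat
      have hTne : (pvInsort s c).take r ≠ [] :=
        take_ne_nil _ r hr1 (by
          intro h
          have := pvInsort_length s c
          rw [h] at this; simp at this)
      have hTsorted : ((pvInsort s c).take r).Pairwise (· ≤ ·) := hs'.take
      have houtB : (pvStepB R (men, res) c).2
          = res ++ [((pvInsort s c).take r).getLast hTne] := by
        have := max_perm_sorted _ _ hkey hTsorted hTne
        simp only [pvStepB] at this ⊢
        rw [this]; rfl
      have houtA : pvStepA R (s, res) c
          = (pvInsort s c, res ++ [((pvInsort s c).take r).getLast hTne]) := by
        simp only [pvStepA]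
        rw [winner_eq R hR (pvInsort s c), ← hr,
          PySem.List.pyGetD_neg_one _ _ hTne]
      have hTperm : ((pvInsort s c).take r).Perm ((pvInsort s c).take R.toNat) := by
        rw [← hr]
      rw [List.foldl_cons, List.foldl_cons, houtA,
        ← Prod.eta (pvStepB R (men, res) c), houtB]
      exact ih (pvInsort s c) (pvStepB R (men, res) c).1 _ hs' (hkey.trans hTperm)

-- ===== VERDICT (by name: the statement is the Claim_ definition above) =====
theorem promocao_cinema_spec : Claim_equal_promocao_cinema := by
  intro P R l _ hR
  unfold Spec_promocao_cinema promocao_cinema promocao_cinema_alt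
  simpa using loop_eq R hR l [] [] [] (by simp) (by simp)
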